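-- pv_equiv track=rewrite | github.com/HanYuanHsu/MZV | src/MZV/utils.py | __lin_extend_helper
-- ===== SOURCE A (Python) =====
-- def __lin_extend_helper(polys):
--     if len(polys) == 1:
--         result = {}
--         for w, c in polys[0].items():
--             result[ (w,) ] = c
--         return result
--
--     recursive = __lin_extend_helper(polys[:-1])
--     result = {}
--     for w, c in polys[-1].items():
--         for key, value in recursive.items():
--             new_key = (*key, w) # *key uses the unpacking operator
--             new_value = value * c
--             result[new_key] = new_value
--
--     return result
-- ===== SOURCE B (Python) =====
-- def __lin_extend_helper(polys):
--     result = {(w,): c for w, c in polys[0].items()}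
--     for poly in polys[1:]:
--         new_result = {}
--         for w, c in poly.items():
--             for key, value in result.items():
--                 new_result[(*key, w)] = value * c
--         result = new_result
--     return result
-- ===== Notes on version B (the rewrite author's own statement) =====
-- stated objective: simpler
-- what changed: The right-peeling recursion with repeated polys[:-1] slicing is replaced by a single left-to-right iterative fold over the polys, carrying the accumulated dict.
import Mathlib
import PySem

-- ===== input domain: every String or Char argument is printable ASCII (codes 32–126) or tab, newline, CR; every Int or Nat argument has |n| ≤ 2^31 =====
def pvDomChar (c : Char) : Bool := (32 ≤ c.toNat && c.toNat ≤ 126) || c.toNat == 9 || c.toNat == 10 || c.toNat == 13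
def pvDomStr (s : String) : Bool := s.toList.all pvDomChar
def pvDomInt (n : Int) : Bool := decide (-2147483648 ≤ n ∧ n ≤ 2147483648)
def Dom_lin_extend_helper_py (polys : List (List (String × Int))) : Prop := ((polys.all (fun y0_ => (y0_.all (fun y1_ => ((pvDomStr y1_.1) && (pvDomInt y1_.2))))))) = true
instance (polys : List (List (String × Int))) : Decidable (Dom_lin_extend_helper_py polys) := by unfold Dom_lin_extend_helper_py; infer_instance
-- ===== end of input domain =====

-- B replaces A's right-peeling recursion over polys[:-1] by a single left-to-right
-- iterative fold over the polys (simpler decomposition; same values, same key order).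


-- ===== PORT A =====
-- A: if len(polys)==1 build the base dict of singleton keys; otherwise recurse on
-- polys[:-1] and combine with polys[-1].  (On [] the Python recurses forever —
-- RecursionError; excluded by Pre_; the port returns Dict.empty there.)
def linExtACore (polys : List (List (String × Int))) : PySem.Dict (List String) Int :=
  if _h1 : polys.length = 1 then
    polys.headI.foldl (fun r wc => r.insert [wc.1] wc.2) PySem.Dict.empty
  else if _h2 : polys.isEmpty then
    PySem.Dict.empty
  else
    let recursive := linExtACore polys.dropLast
    (polys.getLastD []).foldl
      (fun r wc =>
        recursive.items.foldl
          (fun r2 kv => r2.insert (kv.1 ++ [wc.1]) (kv.2 * wc.2)) r)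
      PySem.Dict.empty
termination_by polys.length
decreasing_by
  simp only [List.length_dropLast]
  simp only [List.isEmpty_iff] at _h2
  have : polys.length ≠ 0 := by simpa using (List.length_eq_zero_iff.not.mpr _h2)
  omega

def lin_extend_helper_py (polys : List (List (String × Int))) : List (List String × Int) :=
  (linExtACore polys).items

-- ===== PORT B =====
-- B: result = base dict from polys[0]; then fold over polys[1:], each step building
-- the new dict from scratch.  (On [] the Python raises IndexError; excluded by Pre_.)
def lin_extend_helper_py_alt (polys : List (List (String × Int))) : List (List String × Int) :=
  match polys with
  | [] => []
  | p0 :: rest =>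
    let init : PySem.Dict (List String) Int :=
      p0.foldl (fun r wc => r.insert [wc.1] wc.2) PySem.Dict.empty
    (rest.foldl
      (fun result poly =>
        poly.foldl
          (fun nr wc =>
            result.items.foldl
              (fun nr2 kv => nr2.insert (kv.1 ++ [wc.1]) (kv.2 * wc.2)) nr)
          PySem.Dict.empty)
      init).items

-- ===== PRECONDITION & SPEC =====
-- Pre_ excludes only the empty list, on which A raises RecursionError (and B IndexError).
def Pre_lin_extend_helper_py (polys : List (List (String × Int))) : Prop := polys ≠ []
instance (polys : List (List (String × Int))) : Decidable (Pre_lin_extend_helper_py polys) := by unfold Pre_lin_extend_helper_py; infer_instance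
def pvWitness_lin_extend_helper_py : (List (List (String × Int))) := [[("a", 2), ("b", 3)], [("x", 5)]]
def Spec_lin_extend_helper_py (polys : List (List (String × Int))) (out : List (List String × Int)) : Prop := out = lin_extend_helper_py_alt polys
instance (polys : List (List (String × Int))) (out : List (List String × Int)) : Decidable (Spec_lin_extend_helper_py polys out) := by unfold Spec_lin_extend_helper_py; infer_instance

-- ===== CLAIM (what is proved, stated in full; the proofs are below) =====
def Claim_equal_lin_extend_helper_py : Prop := ∀ (polys : List (List (String × Int))), Dom_lin_extend_helper_py polys → Pre_lin_extend_helper_py polys → Spec_lin_extend_helper_py polys (lin_extend_helper_py polys)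

-- ===== LEMMAS AND PROOFS =====
-- the common "combine one poly with the accumulated dict" step, and the base dict
def pvStep (d : PySem.Dict (List String) Int) (poly : List (String × Int)) : PySem.Dict (List String) Int :=
  poly.foldl
    (fun nr wc =>
      d.items.foldl
        (fun nr2 kv => nr2.insert (kv.1 ++ [wc.1]) (kv.2 * wc.2)) nr)
    PySem.Dict.empty

def pvInit (p : List (String × Int)) : PySem.Dict (List String) Int :=
  p.foldl (fun r wc => r.insert [wc.1] wc.2) PySem.Dict.empty

theorem linExtACore_cons (rs : List (List (String × Int))) (p : List (String × Int)) :
    linExtACore (p :: rs) = rs.foldl pvStep (pvInit p) := by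
  induction rs using List.reverseRecOn with
  | nil =>
      rw [linExtACore]
      simp [pvInit]
  | append_singleton rs q ih =>
      rw [linExtACore]
      have hlen : (p :: (rs ++ [q])).length ≠ 1 := by simp
      have hne : ((p :: (rs ++ [q])).isEmpty) = false := by simp
      simp only [hlen, hne, dif_neg, Bool.false_eq_true, not_false_iff]
      have h1 : (p :: (rs ++ [q])).dropLast = p :: rs := by
        simpa using (List.dropLast_concat (l₁ := p :: rs) (b := q))
      have h2 : (p :: (rs ++ [q])).getLastD [] = q := by
        show ((p :: rs) ++ [q]).getLast?.getD [] = q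
        rw [List.getLast?_concat]; rfl
      rw [h1, h2, ih, List.foldl_append]
      rfl

theorem lin_extend_helper_py_spec : Claim_equal_lin_extend_helper_py := by
  intro polys _hdom hpre
  unfold Spec_lin_extend_helper_py
  match polys with
  | [] => exact absurd rfl hpre
  | p :: rest =>
      show (linExtACore (p :: rest)).items = _
      rw [linExtACore_cons]
      rfl
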